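-- pv_equiv track=rewrite | github.com/Yangbn97/TopDiG | utils/data_utils.py | remove_extra_points
-- ===== SOURCE A (Python) =====
-- def remove_extra_points(raw_contours, N):
--     len_list = [len(ct) for ct in raw_contours]
--     count = 0
--     for i in range(len(len_list)):
--         num = len_list[i]
--         count += num
--         if count >= N:
--             return raw_contours[:(i - 1)]
--
--     return raw_contours
-- ===== SOURCE B (Python) =====
-- def remove_extra_points(raw_contours, N):
--     # Build the prefix-sum table of contour lengths, then binary-search it
--     # (hand-written bisect_left) for the first cumulative count >= N.
--     prefix = []
--     total = 0
--     for ct in raw_contours: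
--         total += len(ct)
--         prefix.append(total)
--     lo, hi = 0, len(prefix)
--     while lo < hi:
--         mid = (lo + hi) // 2
--         if prefix[mid] < N:
--             lo = mid + 1
--         else:
--             hi = mid
--     if lo == len(prefix):
--         return raw_contours
--     return raw_contours[:lo - 1]
-- ===== Notes on version B (the rewrite author's own statement) =====
-- stated objective: alternative
-- what changed: Replaces the linear early-return scan with a prefix-sum table plus a binary search (bisect_left) for the first cumulative length >= N, then a single slice.
import Mathlib
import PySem

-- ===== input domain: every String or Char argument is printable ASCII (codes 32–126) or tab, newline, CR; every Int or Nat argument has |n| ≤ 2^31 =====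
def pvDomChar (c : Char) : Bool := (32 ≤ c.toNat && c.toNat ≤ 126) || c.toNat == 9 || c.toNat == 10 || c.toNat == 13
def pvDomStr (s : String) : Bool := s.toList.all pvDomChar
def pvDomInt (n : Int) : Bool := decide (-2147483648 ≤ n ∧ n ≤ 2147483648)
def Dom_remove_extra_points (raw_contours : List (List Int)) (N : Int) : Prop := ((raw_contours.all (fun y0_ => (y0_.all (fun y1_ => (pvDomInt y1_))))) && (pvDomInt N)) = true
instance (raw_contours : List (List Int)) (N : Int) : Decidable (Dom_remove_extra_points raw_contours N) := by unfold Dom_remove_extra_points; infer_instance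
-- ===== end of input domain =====

-- B replaces A's linear early-return scan by a prefix-sum table + binary search; alternative decomposition, same return value.

-- ===== PORT A =====
-- A's for-loop over len_list with early return: recursion over the length list,
-- carrying the loop index i and the running count.
def pvLoopA (raw_contours : List (List Int)) (N : Int) : List Int → Int → Int → List (List Int)
  | [], _, _ => raw_contours
  | num :: rest, i, count =>
    if N ≤ count + num then PySem.List.slice raw_contours none (some (i - 1))
    else pvLoopA raw_contours N rest (i + 1) (count + num)

def remove_extra_points (raw_contours : List (List Int)) (N : Int) : List (List Int) :=
  pvLoopA raw_contours N (raw_contours.map (fun ct => (ct.length : Int))) 0 0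

-- ===== PORT B =====
-- prefix.append(total) loop of Source B
def pvPrefAcc : List Int → Int → List Int
  | [], _ => []
  | n :: rest, acc => (acc + n) :: pvPrefAcc rest (acc + n)

-- hand-written bisect_left loop of Source B (lo, hi are nonnegative Python ints;
-- prefix[mid] is always in range, so getD is exact here)
def pvBisectLeft (a : List Int) (x : Int) (lo hi : Nat) : Nat :=
  if h : lo < hi then
    let mid := (lo + hi) / 2
    if a.getD mid 0 < x then pvBisectLeft a x (mid + 1) hi
    else pvBisectLeft a x lo mid
  else lo
termination_by hi - lo
decreasing_by all_goals omega

def remove_extra_points_alt (raw_contours : List (List Int)) (N : Int) : List (List Int) :=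
  let pref := pvPrefAcc (raw_contours.map (fun ct => (ct.length : Int))) 0
  let idx := pvBisectLeft pref N 0 pref.length
  if idx = pref.length then raw_contours
  else PySem.List.slice raw_contours none (some ((idx : Int) - 1))

-- ===== PRECONDITION & SPEC =====
def Spec_remove_extra_points (raw_contours : List (List Int)) (N : Int) (out : List (List Int)) : Prop := out = remove_extra_points_alt raw_contours N
instance (raw_contours : List (List Int)) (N : Int) (out : List (List Int)) : Decidable (Spec_remove_extra_points raw_contours N out) := by unfold Spec_remove_extra_points; infer_instance

-- ===== CLAIM (what is proved, stated in full; the proofs are below) =====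
def Claim_equal_remove_extra_points : Prop := ∀ (raw_contours : List (List Int)) (N : Int), Dom_remove_extra_points raw_contours N → Spec_remove_extra_points raw_contours N (remove_extra_points raw_contours N)

-- ===== LEMMAS AND PROOFS =====

-- first index whose value is ≥ x (list length if none)
def pvFfi (a : List Int) (x : Int) : Nat := List.findIdx (fun v => x ≤ v) a

theorem pvPrefAcc_length (l : List Int) (acc : Int) : (pvPrefAcc l acc).length = l.length := by
  induction l generalizing acc with
  | nil => rfl
  | cons n rest ih => simp [pvPrefAcc, ih]

theorem pvPrefAcc_lb (l : List Int) (acc : Int) (h : ∀ n ∈ l, 0 ≤ n) :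
    ∀ v ∈ pvPrefAcc l acc, acc ≤ v := by
  induction l generalizing acc with
  | nil => simp [pvPrefAcc]
  | cons n rest ih =>
    intro v hv
    simp only [pvPrefAcc, List.mem_cons] at hv
    have hn : 0 ≤ n := h n (by simp)
    rcases hv with rfl | hv
    · omega
    · have := ih (acc + n) (fun m hm => h m (by simp [hm])) v hv
      omega

theorem pvPrefAcc_mono (l : List Int) (acc : Int) (h : ∀ n ∈ l, 0 ≤ n) :
    ∀ i j : Nat, i ≤ j → j < (pvPrefAcc l acc).length →
      (pvPrefAcc l acc).getD i 0 ≤ (pvPrefAcc l acc).getD j 0 := by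
  induction l generalizing acc with
  | nil => simp [pvPrefAcc]
  | cons n rest ih =>
    intro i j hij hj
    simp only [pvPrefAcc, List.length_cons] at hj ⊢
    match i, j with
    | 0, 0 => simp
    | 0, (k+1) =>
      simp only [List.getD_cons_zero, List.getD_cons_succ]
      have hk : k < (pvPrefAcc rest (acc + n)).length := by
        simpa using Nat.lt_of_succ_lt_succ hj
      have hmem : (pvPrefAcc rest (acc + n)).getD k 0 ∈ pvPrefAcc rest (acc + n) := by
        rw [List.getD_eq_getElem _ _ hk]; exact List.getElem_mem hk
      exact pvPrefAcc_lb rest (acc + n) (fun m hm => h m (by simp [hm])) _ hmem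
    | (m+1), (k+1) =>
      simp only [List.getD_cons_succ]
      exact ih (acc + n) (fun m hm => h m (by simp [hm])) m k (by omega)
        (by simpa using Nat.lt_of_succ_lt_succ hj)

theorem pvFfi_eq (a : List Int) (x : Int) (n : Nat) (hn : n ≤ a.length)
    (hlt : ∀ k, k < n → a.getD k 0 < x) (hge : n < a.length → x ≤ a.getD n 0) :
    pvFfi a x = n := by
  induction a generalizing n with
  | nil =>
    simp only [List.length_nil, Nat.le_zero] at hn
    subst hn
    simp [pvFfi]
  | cons v rest ih =>
    match n with
    | 0 =>
      have hx : x ≤ v := by simpa using hge (by simp)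
      simp [pvFfi, List.findIdx_cons, hx]
    | (m+1) =>
      have hv : v < x := by simpa using hlt 0 (by omega)
      have : pvFfi rest x = m := by
        apply ih m (by simpa using hn)
        · intro k hk; simpa using hlt (k+1) (by omega)
        · intro hm; simpa using hge (by simpa using hm)
      simp only [pvFfi, List.findIdx_cons] at this ⊢
      simp [not_le.mpr hv, this]

theorem pvBisectLeft_eq (a : List Int) (x : Int)
    (mono : ∀ i j : Nat, i ≤ j → j < a.length → a.getD i 0 ≤ a.getD j 0) :
    ∀ lo hi : Nat, lo ≤ hi → hi ≤ a.length →
      (∀ k, k < lo → a.getD k 0 < x) → (∀ k, hi ≤ k → k < a.length → x ≤ a.getD k 0) →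
      pvBisectLeft a x lo hi = pvFfi a x := by
  intro lo hi
  induction h : hi - lo using Nat.strong_induction_on generalizing lo hi with
  | _ d ih =>
    intro hle hha hlt hge
    rw [pvBisectLeft]
    by_cases hlh : lo < hi
    · simp only [hlh, dif_pos]
      set mid := (lo + hi) / 2 with hmid
      have hm1 : lo ≤ mid := by omega
      have hm2 : mid < hi := by omega
      by_cases hc : a.getD mid 0 < x
      · simp only [hc, if_pos]
        refine ih (hi - (mid + 1)) (by omega) (mid+1) hi rfl (by omega) hha ?_ hge
        intro k hk
        exact lt_of_le_of_lt (mono k mid (by omega) (by omega)) hc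
      · simp only [hc, if_neg, not_false_iff]
        refine ih (mid - lo) (by omega) lo mid rfl (by omega) (by omega) hlt ?_
        intro k hmk hka
        exact le_trans (not_lt.mp hc) (mono mid k hmk hka)
    · simp only [hlh, dif_neg, not_false_iff]
      have hlo : lo = hi := by omega
      subst hlo
      exact (pvFfi_eq a x lo (by omega) hlt (fun h => hge lo (le_refl _) h)).symm

theorem pvLoopA_eq (raw : List (List Int)) (N : Int) :
    ∀ (nums : List Int) (i count : Int),
      pvLoopA raw N nums i count =
        if pvFfi (pvPrefAcc nums count) N < nums.length then
          PySem.List.slice raw none (some (i + (pvFfi (pvPrefAcc nums count) N : Int) - 1))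
        else raw := by
  intro nums
  induction nums with
  | nil => intro i count; simp [pvLoopA, pvPrefAcc, pvFfi]
  | cons n rest ih =>
    intro i count
    simp only [pvLoopA]
    by_cases hc : N ≤ count + n
    · have : pvFfi (pvPrefAcc (n :: rest) count) N = 0 := by
        simp [pvFfi, pvPrefAcc, List.findIdx_cons, hc]
      simp [this, hc]
    · have hstep : pvFfi (pvPrefAcc (n :: rest) count) N
          = pvFfi (pvPrefAcc rest (count + n)) N + 1 := by
        simp [pvFfi, pvPrefAcc, List.findIdx_cons, hc]
      rw [if_neg hc, ih (i + 1) (count + n), hstep]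
      by_cases hlt : pvFfi (pvPrefAcc rest (count + n)) N < rest.length
      · rw [if_pos hlt, if_pos (by simpa using Nat.succ_lt_succ hlt)]
        congr 1
        push_cast
        ring_nf
      · rw [if_neg hlt, if_neg (by simp; omega)]

-- ===== VERDICT (by name: the statement is the Claim_ definition above) =====
theorem remove_extra_points_spec : Claim_equal_remove_extra_points := by
  intro raw N _hdom
  unfold Spec_remove_extra_points remove_extra_points remove_extra_points_alt
  set nums := raw.map (fun ct => (ct.length : Int)) with hnums
  set a := pvPrefAcc nums 0 with ha
  have hlen : a.length = nums.length := by rw [ha, pvPrefAcc_length]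
  have hnn : ∀ n ∈ nums, 0 ≤ n := by
    intro n hn
    rw [hnums] at hn
    simp only [List.mem_map] at hn
    obtain ⟨ct, _, rfl⟩ := hn
    positivity
  have hbl : pvBisectLeft a N 0 a.length = pvFfi a N := by
    exact pvBisectLeft_eq a N (pvPrefAcc_mono nums 0 hnn) 0 a.length (by omega) (le_refl _)
      (by omega) (by omega)
  have hffile : pvFfi a N ≤ a.length := List.findIdx_le_length
  rw [pvLoopA_eq raw N nums 0 0]
  show _ = if pvBisectLeft a N 0 a.length = a.length then raw
      else PySem.List.slice raw none (some ((pvBisectLeft a N 0 a.length : Int) - 1))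
  rw [hbl]
  by_cases hlt : pvFfi a N < nums.length
  · rw [if_pos hlt, if_neg (by omega), ← ha]
    congr 2
    ring
  · rw [if_neg hlt, if_pos (by omega)]
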